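-- pv_equiv track=rewrite | github.com/adiabatic/abbots-morton-spaceport | tools/quikscript_fea.py | _coalesce_parsed_ignore_rules
-- ===== SOURCE A (Python) =====
-- def _is_groupable_context_token(token: str) -> bool:
--     return (
--         not token.startswith("[")
--         and not token.startswith("@")
--         and not token.endswith("'")
--         and "[" not in token
--         and "]" not in token
--     )
--
-- def _format_ignore_sub_line(indent: str, tokens: tuple[str, ...]) -> str:
--     return f"{indent}ignore sub {' '.join(tokens)};"
--
-- def _coalesce_parsed_ignore_rules(
--     entries: list[tuple[str, tuple[str, ...]]],
-- ) -> list[str]: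
--     deduped_entries = []
--     seen = set()
--     for entry in entries:
--         if entry in seen:
--             continue
--         seen.add(entry)
--         deduped_entries.append(entry)
--
--     consumed: set[int] = set()
--     result = []
--     for i, (indent, tokens) in enumerate(deduped_entries):
--         if i in consumed:
--             continue
--
--         best_group: list[int] = []
--         best_slot: int | None = None
--         for slot, token in enumerate(tokens):
--             if not _is_groupable_context_token(token):
--                 continue
--             group = [i]
--             for j in range(i + 1, len(deduped_entries)):
--                 if j in consumed:
--                     continue
--                 other_indent, other_tokens = deduped_entries[j]
--                 if other_indent != indent or len(other_tokens) != len(tokens):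
--                     continue
--                 if not _is_groupable_context_token(other_tokens[slot]):
--                     continue
--                 if other_tokens[:slot] != tokens[:slot]:
--                     continue
--                 if other_tokens[slot + 1:] != tokens[slot + 1:]:
--                     continue
--                 group.append(j)
--             if len(group) > len(best_group):
--                 best_group = group
--                 best_slot = slot
--
--         if best_slot is not None and len(best_group) > 1:
--             replacements = {
--                 deduped_entries[group_index][1][best_slot] for group_index in best_group
--             }
--             if len(replacements) > 1:
--                 grouped_tokens = list(tokens)
--                 grouped_tokens[best_slot] = f"[{' '.join(sorted(replacements))}]"
--                 result.append(_format_ignore_sub_line(indent, tuple(grouped_tokens)))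
--                 consumed.update(best_group)
--                 continue
--
--         result.append(_format_ignore_sub_line(indent, tokens))
--         consumed.add(i)
--
--     return result
-- ===== SOURCE B (Python) =====
-- def _is_groupable_context_token(token: str) -> bool:
--     return (
--         not token.startswith("[")
--         and not token.startswith("@")
--         and not token.endswith("'")
--         and "[" not in token
--         and "]" not in token
--     )
--
-- def _format_ignore_sub_line(indent: str, tokens: tuple[str, ...]) -> str:
--     return f"{indent}ignore sub {' '.join(tokens)};"
--
-- def _diff_slot(tokens, other_tokens):
--     # unique position where the two equal-length tuples differ, else None
--     slot = None
--     for k in range(len(tokens)):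
--         if tokens[k] != other_tokens[k]:
--             if slot is not None:
--                 return None
--             slot = k
--     return slot
--
-- def _coalesce_parsed_ignore_rules(
--     entries: list[tuple[str, tuple[str, ...]]],
-- ) -> list[str]:
--     deduped_entries = list(dict.fromkeys(entries))
--     n = len(deduped_entries)
--
--     consumed: set[int] = set()
--     result = []
--     for i, (indent, tokens) in enumerate(deduped_entries):
--         if i in consumed:
--             continue
--
--         # one pass over the later entries: each candidate j differs from
--         # tokens in exactly one slot, so bucket it under that slot
--         slot_members: dict[int, list[int]] = {}
--         for j in range(i + 1, n):
--             if j in consumed: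
--                 continue
--             other_indent, other_tokens = deduped_entries[j]
--             if other_indent != indent or len(other_tokens) != len(tokens):
--                 continue
--             slot = _diff_slot(tokens, other_tokens)
--             if slot is None:
--                 continue
--             if _is_groupable_context_token(tokens[slot]) and _is_groupable_context_token(other_tokens[slot]):
--                 slot_members[slot] = slot_members.get(slot, []) + [j]
--
--         best_size = 0
--         best_slot = None
--         for slot, token in enumerate(tokens):
--             if not _is_groupable_context_token(token):
--                 continue
--             size = 1 + len(slot_members.get(slot, []))
--             if size > best_size:
--                 best_size = size
--                 best_slot = slot
--
--         if best_slot is not None and best_size > 1: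
--             members = slot_members.get(best_slot, [])
--             replacements = {tokens[best_slot]}
--             for j in members:
--                 replacements.add(deduped_entries[j][1][best_slot])
--             if len(replacements) > 1:
--                 grouped_tokens = list(tokens)
--                 grouped_tokens[best_slot] = f"[{' '.join(sorted(replacements))}]"
--                 result.append(_format_ignore_sub_line(indent, tuple(grouped_tokens)))
--                 consumed.add(i)
--                 for j in members:
--                     consumed.add(j)
--                 continue
--
--         result.append(_format_ignore_sub_line(indent, tokens))
--         consumed.add(i)
--
--     return result
-- ===== Notes on version B (the rewrite author's own statement) =====
-- stated objective: faster
-- what changed: Instead of rescanning all later entries once per slot (per-slot nested scans), B makes one pass over the later entries, computes for each the unique differing slot against the current entry, and buckets candidates into a slot->members dict; the best slot is then read off the bucket sizes.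
import Mathlib
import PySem

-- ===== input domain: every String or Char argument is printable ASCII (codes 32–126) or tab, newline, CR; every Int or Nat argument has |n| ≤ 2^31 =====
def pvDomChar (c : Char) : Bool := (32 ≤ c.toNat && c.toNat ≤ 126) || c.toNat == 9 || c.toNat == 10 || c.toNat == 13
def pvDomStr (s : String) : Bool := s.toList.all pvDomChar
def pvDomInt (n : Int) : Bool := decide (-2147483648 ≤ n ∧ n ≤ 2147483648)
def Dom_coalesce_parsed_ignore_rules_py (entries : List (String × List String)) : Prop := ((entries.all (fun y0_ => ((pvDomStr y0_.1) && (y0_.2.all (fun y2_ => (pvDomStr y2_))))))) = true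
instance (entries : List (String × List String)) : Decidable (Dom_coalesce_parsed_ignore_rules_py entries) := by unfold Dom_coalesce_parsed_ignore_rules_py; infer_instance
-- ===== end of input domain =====

-- B replaces A's per-slot rescans of the later entries by a single pass that buckets each
-- later entry under the unique slot where it differs (a slot -> members dict): faster per step.

-- ===== PORT A =====
-- shared helpers (identical functions in both Python files)
def pvGroupable (token : String) : Bool :=
  !(PySem.Str.startswith token "[") && !(PySem.Str.startswith token "@") &&
  !(PySem.Str.endswith token "'") && !(PySem.Str.isIn "[" token) && !(PySem.Str.isIn "]" token)

def pvFmt (indent : String) (tokens : List String) : String :=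
  indent ++ "ignore sub " ++ PySem.Str.join " " tokens ++ ";"

-- A's dedup loop (seen set + output list)
def pvDedupA (entries : List (String × List String)) : List (String × List String) :=
  (entries.foldl
    (fun st entry =>
      if PySem.Set.contains st.1 entry then st
      else (PySem.Set.add st.1 entry, st.2 ++ [entry]))
    ((PySem.Set.empty : PySem.Set (String × List String)), ([] : List (String × List String)))).2

-- A's inner 'for j in range(i+1, len(deduped_entries))' building 'group' (starts as [i])
def pvGroupA (d : List (String × List String)) (consumed : PySem.Set Int)
    (indent : String) (tokens : List String) (i slot : Int) : List Int :=
  (PySem.List.pyRange (i + 1) (d.length : Int) 1).foldl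
    (fun g j =>
      if PySem.Set.contains consumed j then g
      else
        let other := PySem.List.pyGetD d j ("", [])
        if other.1 != indent || other.2.length != tokens.length then g
        else if !(pvGroupable (PySem.List.pyGetD other.2 slot "")) then g
        else if PySem.List.slice other.2 none (some slot) != PySem.List.slice tokens none (some slot) then g
        else if PySem.List.slice other.2 (some (slot + 1)) none != PySem.List.slice tokens (some (slot + 1)) none then g
        else g ++ [j])
    [i]

-- A's 'for slot, token in enumerate(tokens)' computing (best_group, best_slot)
def pvBestA (d : List (String × List String)) (consumed : PySem.Set Int)
    (indent : String) (tokens : List String) (i : Int) : List Int × Option Int :=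
  (PySem.List.enumerate tokens 0).foldl
    (fun b q =>
      if !(pvGroupable q.2) then b
      else
        let group := pvGroupA d consumed indent tokens i q.1
        if group.length > b.1.length then (group, some q.1) else b)
    (([] : List Int), (none : Option Int))

-- one iteration of A's main loop (state: consumed set, result list)
def pvStepA (d : List (String × List String))
    (st : PySem.Set Int × List String) (p : Int × (String × List String)) :
    PySem.Set Int × List String :=
  if PySem.Set.contains st.1 p.1 then st
  else
    let i := p.1
    let indent := p.2.1
    let tokens := p.2.2
    let best := pvBestA d st.1 indent tokens i
    match best.2 with
    | some slot =>
      if best.1.length > 1 then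
        let replacements : PySem.Set String := PySem.Set.ofList
          (best.1.map (fun g => PySem.List.pyGetD (PySem.List.pyGetD d g ("", [])).2 slot ""))
        if replacements.length > 1 then
          (PySem.Set.update st.1 best.1,
           st.2 ++ [pvFmt indent (PySem.List.pySetD tokens slot
             ("[" ++ PySem.Str.join " " (PySem.List.sorted replacements (fun x => x) false) ++ "]"))])
        else (PySem.Set.add st.1 i, st.2 ++ [pvFmt indent tokens])
      else (PySem.Set.add st.1 i, st.2 ++ [pvFmt indent tokens])
    | none => (PySem.Set.add st.1 i, st.2 ++ [pvFmt indent tokens])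

def coalesce_parsed_ignore_rules_py (entries : List (String × List String)) : List String :=
  let deduped := pvDedupA entries
  ((PySem.List.enumerate deduped 0).foldl (pvStepA deduped)
    ((PySem.Set.empty : PySem.Set Int), ([] : List String))).2

-- ===== PORT B =====
-- B's _diff_slot loop (index k, running unique-diff slot; the two-cons recursion is the
-- loop 'for k in range(len(tokens))' — the lists have equal length at every call site)
def pvDiffSlotAux (xs ys : List String) (k : Int) (slot : Option Int) : Option Int :=
  match xs, ys with
  | [], _ => slot
  | _ :: _, [] => slot   -- unreachable at call sites (equal lengths)
  | x :: xs', y :: ys' =>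
    if x != y then
      match slot with
      | some _ => none          -- second difference: return None
      | none => pvDiffSlotAux xs' ys' (k + 1) (some k)
    else pvDiffSlotAux xs' ys' (k + 1) slot

def pvDiffSlot (xs ys : List String) : Option Int := pvDiffSlotAux xs ys 0 none

-- B's single pass over j bucketing candidates by their unique differing slot
def pvMembersB (d : List (String × List String)) (consumed : PySem.Set Int)
    (indent : String) (tokens : List String) (i : Int) : PySem.Dict Int (List Int) :=
  (PySem.List.pyRange (i + 1) (d.length : Int) 1).foldl
    (fun sm j =>
      if PySem.Set.contains consumed j then sm
      else
        let other := PySem.List.pyGetD d j ("", [])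
        if other.1 != indent || other.2.length != tokens.length then sm
        else
          match pvDiffSlot tokens other.2 with
          | none => sm
          | some slot =>
            if pvGroupable (PySem.List.pyGetD tokens slot "") &&
               pvGroupable (PySem.List.pyGetD other.2 slot "") then
              sm.modify slot [] (fun l => l ++ [j])  -- slot_members[slot] = slot_members.get(slot, []) + [j]
            else sm)
    PySem.Dict.empty

-- B's 'for slot, token in enumerate(tokens)' computing (best_size, best_slot)
def pvBestB (slotMembers : PySem.Dict Int (List Int)) (tokens : List String) : Nat × Option Int :=
  (PySem.List.enumerate tokens 0).foldl
    (fun b q =>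
      if !(pvGroupable q.2) then b
      else
        let size := 1 + (slotMembers.getD q.1 []).length
        if size > b.1 then (size, some q.1) else b)
    ((0 : Nat), (none : Option Int))

-- one iteration of B's main loop
def pvStepB (d : List (String × List String))
    (st : PySem.Set Int × List String) (p : Int × (String × List String)) :
    PySem.Set Int × List String :=
  if PySem.Set.contains st.1 p.1 then st
  else
    let i := p.1
    let indent := p.2.1
    let tokens := p.2.2
    let slotMembers := pvMembersB d st.1 indent tokens i
    let best := pvBestB slotMembers tokens
    match best.2 with
    | some slot =>
      if best.1 > 1 then
        let members := slotMembers.getD slot []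
        let replacements := members.foldl
          (fun s j => PySem.Set.add s (PySem.List.pyGetD (PySem.List.pyGetD d j ("", [])).2 slot ""))
          (PySem.Set.ofList [PySem.List.pyGetD tokens slot ""])
        if replacements.length > 1 then
          (members.foldl (fun c j => PySem.Set.add c j) (PySem.Set.add st.1 i),
           st.2 ++ [pvFmt indent (PySem.List.pySetD tokens slot
             ("[" ++ PySem.Str.join " " (PySem.List.sorted replacements (fun x => x) false) ++ "]"))])
        else (PySem.Set.add st.1 i, st.2 ++ [pvFmt indent tokens])
      else (PySem.Set.add st.1 i, st.2 ++ [pvFmt indent tokens])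
    | none => (PySem.Set.add st.1 i, st.2 ++ [pvFmt indent tokens])

def coalesce_parsed_ignore_rules_py_alt (entries : List (String × List String)) : List String :=
  let deduped := PySem.List.dedup entries
  ((PySem.List.enumerate deduped 0).foldl (pvStepB deduped)
    ((PySem.Set.empty : PySem.Set Int), ([] : List String))).2

-- ===== PRECONDITION & SPEC =====
def Spec_coalesce_parsed_ignore_rules_py (entries : List (String × List String)) (out : List String) : Prop := out = coalesce_parsed_ignore_rules_py_alt entries
instance (entries : List (String × List String)) (out : List String) : Decidable (Spec_coalesce_parsed_ignore_rules_py entries out) := by unfold Spec_coalesce_parsed_ignore_rules_py; infer_instance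

-- ===== CLAIM (what is proved, stated in full; the proofs are below) =====
def Claim_equal_coalesce_parsed_ignore_rules_py : Prop := ∀ (entries : List (String × List String)), Dom_coalesce_parsed_ignore_rules_py entries → Spec_coalesce_parsed_ignore_rules_py entries (coalesce_parsed_ignore_rules_py entries)

-- ===== LEMMAS AND PROOFS =====

-- A's candidate predicate for a fixed slot (the nested ifs of pvGroupA's body)
def pvPA (d : List (String × List String)) (consumed : PySem.Set Int)
    (indent : String) (tokens : List String) (slot : Int) (j : Int) : Bool :=
  !(PySem.Set.contains consumed j) &&
  !((PySem.List.pyGetD d j ("", [])).1 != indent || (PySem.List.pyGetD d j ("", [])).2.length != tokens.length) &&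
  pvGroupable (PySem.List.pyGetD (PySem.List.pyGetD d j ("", [])).2 slot "") &&
  !(PySem.List.slice (PySem.List.pyGetD d j ("", [])).2 none (some slot) != PySem.List.slice tokens none (some slot)) &&
  !(PySem.List.slice (PySem.List.pyGetD d j ("", [])).2 (some (slot + 1)) none != PySem.List.slice tokens (some (slot + 1)) none)

-- B's candidate predicate (candidate j has a unique differing slot, both tokens groupable)
def pvPB (d : List (String × List String)) (consumed : PySem.Set Int)
    (indent : String) (tokens : List String) (j : Int) : Bool :=
  !(PySem.Set.contains consumed j) &&
  !((PySem.List.pyGetD d j ("", [])).1 != indent || (PySem.List.pyGetD d j ("", [])).2.length != tokens.length) &&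
  (match pvDiffSlot tokens (PySem.List.pyGetD d j ("", [])).2 with
   | none => false
   | some slot =>
     pvGroupable (PySem.List.pyGetD tokens slot "") &&
     pvGroupable (PySem.List.pyGetD (PySem.List.pyGetD d j ("", [])).2 slot ""))

def pvSlotOf (d : List (String × List String)) (tokens : List String) (j : Int) : Int :=
  (pvDiffSlot tokens (PySem.List.pyGetD d j ("", [])).2).getD 0

theorem pv_dedup_loop (l : List (String × List String)) (s : PySem.Set (String × List String)) :
    l.foldl (fun st entry => if PySem.Set.contains st.1 entry then st
                             else (PySem.Set.add st.1 entry, st.2 ++ [entry])) (s, s)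
      = (PySem.Set.update s l, PySem.Set.update s l) := by
  induction l generalizing s with
  | nil => simp [PySem.Set.update]
  | cons e t ih =>
    simp only [List.foldl_cons]
    by_cases he : e ∈ s
    · rw [if_pos (by simpa [PySem.Set.contains_iff] using he)]
      rw [ih s, PySem.Set.update_cons, PySem.Set.add_of_mem he]
    · rw [if_neg (by simpa [PySem.Set.contains_iff] using he)]
      have : (PySem.Set.add s e, s ++ [e]) = (PySem.Set.add s e, PySem.Set.add s e) := by
        rw [PySem.Set.add_of_not_mem he]
      rw [this, ih, PySem.Set.update_cons]

theorem pv_dedup_eq (entries : List (String × List String)) :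
    pvDedupA entries = PySem.List.dedup entries := by
  unfold pvDedupA
  rw [show ((PySem.Set.empty : PySem.Set (String × List String)), ([] : List (String × List String)))
        = ((PySem.Set.empty : PySem.Set (String × List String)), (PySem.Set.empty : PySem.Set (String × List String))) from rfl,
      pv_dedup_loop, PySem.List.dedup_eq_ofList, ← PySem.Set.update_empty]

-- characterization of B's _diff_slot loop
theorem pv_aux_some (xs ys : List String) (hlen : xs.length = ys.length) (k : Int) (m : Int) :
    pvDiffSlotAux xs ys k (some m) = if xs = ys then some m else none := by
  induction xs generalizing ys k with
  | nil =>
    have : ys = [] := List.eq_nil_of_length_eq_zero hlen.symm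
    subst this; rfl
  | cons x xs ih =>
    cases ys with
    | nil => simp at hlen
    | cons y ys =>
      by_cases hxy : x = y
      · subst hxy
        simp only [pvDiffSlotAux, bne_self_eq_false, if_neg Bool.false_ne_true]
        rw [ih ys (by simpa using hlen) (k+1)]
        by_cases h : xs = ys <;> simp [h]
      · have hne : (x :: xs) ≠ (y :: ys) := by simp [hxy]
        simp [pvDiffSlotAux, bne_iff_ne, hxy, hne]

theorem pv_aux_none (xs ys : List String) (hlen : xs.length = ys.length) (k v : Int) :
    pvDiffSlotAux xs ys k none = some v ↔
      ∃ s : Nat, s < xs.length ∧ v = k + (s : Int) ∧ xs.take s = ys.take s ∧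
        xs.drop (s+1) = ys.drop (s+1) ∧ xs[s]? ≠ ys[s]? := by
  induction xs generalizing ys k with
  | nil =>
    constructor
    · intro h; exact absurd h (by simp [pvDiffSlotAux])
    · rintro ⟨s, hs, -⟩; simp at hs
  | cons x xs ih =>
    cases ys with
    | nil => simp at hlen
    | cons y ys =>
      have hlen' : xs.length = ys.length := by simpa using hlen
      by_cases hxy : x = y
      · subst hxy
        simp only [pvDiffSlotAux, bne_self_eq_false, if_neg Bool.false_ne_true]
        rw [ih ys hlen' (k+1)]
        constructor
        · rintro ⟨s, hs, hv, ht, hd, hg⟩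
          exact ⟨s+1, by simpa using Nat.succ_lt_succ hs, by push_cast; omega,
            by simpa [List.take_succ_cons] using ht, by simpa using hd, by simpa using hg⟩
        · rintro ⟨s, hs, hv, ht, hd, hg⟩
          cases s with
          | zero => simp at hg
          | succ s =>
            exact ⟨s, by simpa using Nat.lt_of_succ_lt_succ hs, by push_cast at hv ⊢; omega,
              by simpa [List.take_succ_cons] using ht, by simpa using hd, by simpa using hg⟩
      · rw [show pvDiffSlotAux (x :: xs) (y :: ys) k none = pvDiffSlotAux xs ys (k+1) (some k) by
              simp [pvDiffSlotAux, bne_iff_ne, hxy],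
            pv_aux_some xs ys hlen' (k+1) k]
        by_cases heq : xs = ys
        · subst heq
          rw [if_pos rfl]
          constructor
          · intro hv
            have hv' : v = k := (Option.some.inj hv).symm
            exact ⟨0, by simp, by omega, by simp, by simp, by simp [hxy]⟩
          · rintro ⟨s, hs, hv, ht, hd, hg⟩
            cases s with
            | zero =>
              have : v = k := by push_cast at hv; omega
              exact congrArg some this.symm
            | succ s =>
              exfalso
              apply hxy
              have := congrArg (fun l => l[0]?) ht
              simpa using this
        · simp only [if_neg heq]
          constructor
          · intro h; exact absurd h (by simp)
          · rintro ⟨s, hs, hv, ht, hd, hg⟩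
            exfalso
            cases s with
            | zero => exact heq (by simpa using hd)
            | succ s =>
              apply hxy
              have := congrArg (fun l => l[0]?) ht
              simpa using this

theorem pv_diffSlot_some_iff (xs ys : List String) (hlen : xs.length = ys.length) (s : Nat) :
    pvDiffSlot xs ys = some (s : Int) ↔
      s < xs.length ∧ xs.take s = ys.take s ∧ xs.drop (s+1) = ys.drop (s+1) ∧ xs[s]? ≠ ys[s]? := by
  unfold pvDiffSlot
  rw [pv_aux_none xs ys hlen 0 (s : Int)]
  constructor
  · rintro ⟨s', hs', hv, ht, hd, hg⟩
    have : s = s' := by omega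
    subst this; exact ⟨hs', ht, hd, hg⟩
  · rintro ⟨hs, ht, hd, hg⟩
    exact ⟨s, hs, by omega, ht, hd, hg⟩

-- two equal-length lists that agree outside position s and are different, differ at s
theorem pv_ne_at (xs ys : List String) (hlen : xs.length = ys.length) (s : Nat)
    (hs : s < xs.length) (ht : xs.take s = ys.take s) (hd : xs.drop (s+1) = ys.drop (s+1))
    (hne : xs ≠ ys) : xs[s]? ≠ ys[s]? := by
  intro hg
  apply hne
  have hs' : s < ys.length := hlen ▸ hs
  have h1 : xs = xs.take s ++ xs[s] :: xs.drop (s+1) := by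
    conv_lhs => rw [← List.take_append_drop s xs]
    rw [List.drop_eq_getElem_cons hs]
  have h2 : ys = ys.take s ++ ys[s] :: ys.drop (s+1) := by
    conv_lhs => rw [← List.take_append_drop s ys]
    rw [List.drop_eq_getElem_cons hs']
  have hgs : xs[s] = ys[s] := by
    rw [List.getElem?_eq_getElem hs, List.getElem?_eq_getElem hs'] at hg
    exact Option.some.inj hg
  rw [h1, h2, ht, hd, hgs]

-- A's group loop is [i] followed by the filtered later indices
theorem pv_groupA_eq (d : List (String × List String)) (c : PySem.Set Int)
    (indent : String) (tokens : List String) (i slot : Int) :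
    pvGroupA d c indent tokens i slot
      = i :: (PySem.List.pyRange (i + 1) (d.length : Int) 1).filter (pvPA d c indent tokens slot) := by
  unfold pvGroupA
  rw [PySem.List.foldl_congr_mem _ _
    (fun g j => if pvPA d c indent tokens slot j then g ++ [j] else g) _ ?_]
  · rw [PySem.List.foldl_append_if_eq_filter]
    simp
  · intro g j _
    simp only [pvPA]
    split_ifs <;> simp_all

-- B's bucket for key σ is the filtered later indices whose unique diff slot is σ
theorem pv_membersB_getD (d : List (String × List String)) (c : PySem.Set Int)
    (indent : String) (tokens : List String) (i σ : Int) :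
    (pvMembersB d c indent tokens i).getD σ []
      = (PySem.List.pyRange (i + 1) (d.length : Int) 1).filter
          (fun j => pvPB d c indent tokens j && (pvSlotOf d tokens j == σ)) := by
  unfold pvMembersB
  rw [PySem.List.foldl_congr_mem _ _
    (fun sm j => if pvPB d c indent tokens j
                 then PySem.Dict.modify sm (pvSlotOf d tokens j) [] (fun l => l ++ [j]) else sm) _ ?_]
  · rw [PySem.List.foldl_if_eq_foldl_filter,
        ← List.foldl_map (f := fun j => (pvSlotOf d tokens j, j))
          (g := fun sm p => PySem.Dict.modify sm p.1 [] (fun l => l ++ [p.2])),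
        PySem.Dict.getD_foldl_modify_append, List.filter_map, List.map_map]
    simp only [Function.comp_def, List.filter_filter, PySem.Dict.getD, PySem.Dict.get?,
      PySem.Dict.empty, List.find?_nil, Option.map_none, Option.getD_none, List.nil_append,
      List.map_id_fun', id]
    refine Eq.trans ?_ (List.filter_congr (fun j _ => Bool.and_comm (pvSlotOf d tokens j == σ) (pvPB d c indent tokens j)))
    simp
  · intro sm j _
    simp only [pvPB, pvSlotOf]
    cases h1 : PySem.Set.contains c j
    · cases h2 : ((PySem.List.pyGetD d j ("", [])).1 != indent ||
        (PySem.List.pyGetD d j ("", [])).2.length != tokens.length)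
      · rcases hds : pvDiffSlot tokens (PySem.List.pyGetD d j ("", [])).2 with _ | slot
        · simp
        · cases h3 : (pvGroupable (PySem.List.pyGetD tokens slot "") &&
            pvGroupable (PySem.List.pyGetD (PySem.List.pyGetD d j ("", [])).2 slot "")) <;>
            simp [h3, Option.getD]
      · simp
    · simp

-- the per-candidate predicates agree (given the deduped list is duplicate-free)
theorem pv_pointwise (d : List (String × List String)) (hnd : d.Nodup) (c : PySem.Set Int)
    (k : Nat) (hk : k < d.length) (s : Nat) (hs : s < (d[k].2).length)
    (hgs : pvGroupable (d[k].2)[s] = true) (j : Int)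
    (hj1 : (k : Int) + 1 ≤ j) (hj2 : j < (d.length : Int)) :
    pvPA d c d[k].1 d[k].2 (s : Int) j
      = (pvPB d c d[k].1 d[k].2 j && (pvSlotOf d (d[k].2) j == (s : Int))) := by
  have h0j : 0 ≤ j := by omega
  have hjm : j = (j.toNat : Int) := by omega
  have hmd : j.toNat < d.length := by omega
  have hkm : k < j.toNat := by omega
  have hget : PySem.List.pyGetD d j ("", []) = d[j.toNat] :=
    PySem.List.pyGetD_eq_getElem d ("", []) h0j hj2
  unfold pvPA pvPB pvSlotOf
  rw [hget]
  cases h1 : PySem.Set.contains c j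
  case true => simp
  simp only [Bool.not_false, Bool.true_and]
  cases h2 : ((d[j.toNat].1 != d[k].1) || (d[j.toNat].2.length != (d[k].2).length))
  case true => simp
  simp only [Bool.not_false, Bool.true_and]
  have hind : d[j.toNat].1 = d[k].1 := by
    simp only [Bool.or_eq_false_iff, bne_eq_false_iff_eq] at h2; exact h2.1
  have hlen : (d[k].2).length = d[j.toNat].2.length := by
    simp only [Bool.or_eq_false_iff, bne_eq_false_iff_eq] at h2; exact h2.2.symm
  have hso : s < d[j.toNat].2.length := hlen ▸ hs
  have hne : d[k].2 ≠ d[j.toNat].2 := by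
    intro h
    have hpair : d[j.toNat] = d[k] := Prod.ext hind h.symm
    exact absurd ((List.Nodup.getElem_inj_iff hnd).mp hpair) (by omega)
  have hgo : PySem.List.pyGetD d[j.toNat].2 (s : Int) "" = d[j.toNat].2[s] := by
    rw [PySem.List.pyGetD_natCast, List.getD_eq_getElem _ _ hso]
  have hgt : PySem.List.pyGetD (d[k].2) (s : Int) "" = (d[k].2)[s] := by
    rw [PySem.List.pyGetD_natCast, List.getD_eq_getElem _ _ hs]
  have hsl1 : PySem.List.slice d[j.toNat].2 none (some (s : Int)) = d[j.toNat].2.take s :=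
    PySem.List.slice_to_natCast _ s
  have hsl2 : PySem.List.slice (d[k].2) none (some (s : Int)) = (d[k].2).take s :=
    PySem.List.slice_to_natCast _ s
  have hcast : ((s : Int) + 1) = ((s + 1 : Nat) : Int) := by push_cast; ring
  have hsl3 : PySem.List.slice d[j.toNat].2 (some ((s : Int) + 1)) none = d[j.toNat].2.drop (s+1) := by
    rw [hcast]; exact PySem.List.slice_from_natCast _ (s+1)
  have hsl4 : PySem.List.slice (d[k].2) (some ((s : Int) + 1)) none = (d[k].2).drop (s+1) := by
    rw [hcast]; exact PySem.List.slice_from_natCast _ (s+1)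
  rw [hgo, hsl1, hsl2, hsl3, hsl4]
  rcases hds : pvDiffSlot (d[k].2) d[j.toNat].2 with _ | v
  · -- no unique diff slot: both sides are false
    simp only [Bool.false_and]
    by_cases e1 : d[j.toNat].2.take s = (d[k].2).take s
    · by_cases e2 : d[j.toNat].2.drop (s+1) = (d[k].2).drop (s+1)
      · exfalso
        have : pvDiffSlot (d[k].2) d[j.toNat].2 = some (s : Int) :=
          (pv_diffSlot_some_iff _ _ hlen s).2 ⟨hs, e1.symm, e2.symm,
            pv_ne_at _ _ hlen s hs e1.symm e2.symm hne⟩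
        rw [hds] at this; exact absurd this (by simp)
      · simp [bne_iff_ne, e2]
    · simp [bne_iff_ne, e1]
  · -- unique diff slot v
    by_cases hv : v = (s : Int)
    · subst hv
      obtain ⟨-, htake, hdrop, -⟩ := (pv_diffSlot_some_iff _ _ hlen s).1 hds
      simp [hgt, hgo, htake.symm, hdrop.symm, hgs]
    · -- v ≠ s: RHS is false; LHS must be too
      have hrhs : ((v : Int) == (s : Int)) = false := by simp [hv]
      simp only [Option.getD_some, hrhs, Bool.and_false]
      by_cases e1 : d[j.toNat].2.take s = (d[k].2).take s
      · by_cases e2 : d[j.toNat].2.drop (s+1) = (d[k].2).drop (s+1)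
        · exfalso
          have : pvDiffSlot (d[k].2) d[j.toNat].2 = some (s : Int) :=
            (pv_diffSlot_some_iff _ _ hlen s).2 ⟨hs, e1.symm, e2.symm,
              pv_ne_at _ _ hlen s hs e1.symm e2.symm hne⟩
          rw [hds] at this
          exact hv (Option.some.inj this)
        · simp [bne_iff_ne, e2]
      · simp [bne_iff_ne, e1]

-- hence A's per-slot group equals [i] ++ B's bucket
theorem pv_group_members (d : List (String × List String)) (hnd : d.Nodup) (c : PySem.Set Int)
    (k : Nat) (hk : k < d.length) (s : Nat) (hs : s < (d[k].2).length)
    (hgs : pvGroupable (d[k].2)[s] = true) :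
    pvGroupA d c d[k].1 d[k].2 (k : Int) (s : Int)
      = (k : Int) :: (pvMembersB d c d[k].1 d[k].2 (k : Int)).getD (s : Int) [] := by
  rw [pv_groupA_eq, pv_membersB_getD]
  congr 1
  exact List.filter_congr (fun j hj => by
    rw [PySem.List.mem_pyRange_one] at hj
    exact pv_pointwise d hnd c k hk s hs hgs j hj.1 hj.2)

theorem pv_best_fold (d : List (String × List String)) (hnd : d.Nodup) (c : PySem.Set Int)
    (k : Nat) (hk : k < d.length) (L : List (Int × String))
    (hL : ∀ q ∈ L, ∃ s : Nat, ∃ _ : s < (d[k].2).length, q = ((s : Int), (d[k].2)[s]))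
    (b : List Int × Option Int) (cB : Nat × Option Int)
    (h1 : cB.1 = b.1.length) (h2 : cB.2 = b.2)
    (h3 : ∀ σ : Int, b.2 = some σ →
      b.1 = (k : Int) :: (pvMembersB d c d[k].1 d[k].2 (k : Int)).getD σ []) :
    (L.foldl (fun b q =>
        if !(pvGroupable q.2) then b
        else
          let group := pvGroupA d c d[k].1 d[k].2 (k : Int) q.1
          if group.length > b.1.length then (group, some q.1) else b) b).1.length
      = (L.foldl (fun b q =>
        if !(pvGroupable q.2) then b
        else
          let size := 1 + ((pvMembersB d c d[k].1 d[k].2 (k : Int)).getD q.1 []).length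
          if size > b.1 then (size, some q.1) else b) cB).1 ∧
    (L.foldl (fun b q =>
        if !(pvGroupable q.2) then b
        else
          let size := 1 + ((pvMembersB d c d[k].1 d[k].2 (k : Int)).getD q.1 []).length
          if size > b.1 then (size, some q.1) else b) cB).2
      = (L.foldl (fun b q =>
        if !(pvGroupable q.2) then b
        else
          let group := pvGroupA d c d[k].1 d[k].2 (k : Int) q.1
          if group.length > b.1.length then (group, some q.1) else b) b).2 ∧
    (∀ σ : Int, (L.foldl (fun b q =>
        if !(pvGroupable q.2) then b
        else
          let group := pvGroupA d c d[k].1 d[k].2 (k : Int) q.1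
          if group.length > b.1.length then (group, some q.1) else b) b).2 = some σ →
      (L.foldl (fun b q =>
        if !(pvGroupable q.2) then b
        else
          let group := pvGroupA d c d[k].1 d[k].2 (k : Int) q.1
          if group.length > b.1.length then (group, some q.1) else b) b).1
        = (k : Int) :: (pvMembersB d c d[k].1 d[k].2 (k : Int)).getD σ []) := by
  induction L generalizing b cB with
  | nil => exact ⟨h1.symm, h2, h3⟩
  | cons q L ih =>
    obtain ⟨s, hsl, rfl⟩ := hL q (List.mem_cons_self ..)
    have hL' := fun q hq => hL q (List.mem_cons_of_mem _ hq)
    simp only [List.foldl_cons]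
    cases hg : pvGroupable (d[k].2)[s]
    · rw [Bool.not_false, if_pos rfl, if_pos rfl]
      exact ih hL' b cB h1 h2 h3
    · simp only [Bool.not_true, if_neg Bool.false_ne_true]
      rw [pv_group_members d hnd c k hk s hsl hg]
      have hsz : 1 + ((pvMembersB d c d[k].1 d[k].2 (k : Int)).getD ((s : Int)) []).length
          = ((k : Int) :: (pvMembersB d c d[k].1 d[k].2 (k : Int)).getD ((s : Int)) []).length := by
        simp [Nat.add_comm]
      rw [hsz, h1]
      by_cases hcmp : ((k : Int) :: (pvMembersB d c d[k].1 d[k].2 (k : Int)).getD ((s : Int)) []).length > b.1.length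
      · rw [if_pos hcmp, if_pos hcmp]
        exact ih hL' _ _ rfl rfl (fun σ hσ => by
          simp only at hσ
          rw [← Option.some.inj hσ])
      · rw [if_neg hcmp, if_neg hcmp]
        exact ih hL' b cB h1 h2 h3

-- the two best-slot folds stay related
theorem pv_best_inv (d : List (String × List String)) (hnd : d.Nodup) (c : PySem.Set Int)
    (k : Nat) (hk : k < d.length) :
    (pvBestB (pvMembersB d c d[k].1 d[k].2 (k : Int)) (d[k].2)).1
        = (pvBestA d c d[k].1 d[k].2 (k : Int)).1.length ∧
    (pvBestB (pvMembersB d c d[k].1 d[k].2 (k : Int)) (d[k].2)).2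
        = (pvBestA d c d[k].1 d[k].2 (k : Int)).2 ∧
    (∀ σ : Int, (pvBestA d c d[k].1 d[k].2 (k : Int)).2 = some σ →
      (pvBestA d c d[k].1 d[k].2 (k : Int)).1
        = (k : Int) :: (pvMembersB d c d[k].1 d[k].2 (k : Int)).getD σ []) := by
  unfold pvBestA pvBestB
  have hL : ∀ q ∈ PySem.List.enumerate (d[k].2) 0,
      ∃ s : Nat, ∃ _ : s < (d[k].2).length, q = ((s : Int), (d[k].2)[s]) := by
    intro q hq
    rw [PySem.List.mem_enumerate_iff] at hq
    obtain ⟨s, h, rfl⟩ := hq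
    exact ⟨s, h, by simp⟩
  have H := pv_best_fold d hnd c k hk (PySem.List.enumerate (d[k].2) 0) hL
      (([] : List Int), (none : Option Int)) ((0 : Nat), (none : Option Int)) rfl rfl
      (fun σ h => by cases h)
  exact ⟨H.1.symm, H.2.1, H.2.2⟩

theorem pv_ofList_cons_map (x : String) (l : List Int) (f : Int → String) :
    PySem.Set.ofList (x :: l.map f)
      = l.foldl (fun s j => PySem.Set.add s (f j)) (PySem.Set.ofList [x]) := by
  rw [PySem.Set.ofList_eq_foldl, PySem.Set.ofList_eq_foldl, List.foldl_cons, List.foldl_cons,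
    List.foldl_nil, List.foldl_map]

theorem pv_step_eq (d : List (String × List String)) (hnd : d.Nodup)
    (st : PySem.Set Int × List String) (p : Int × (String × List String))
    (hp : p ∈ PySem.List.enumerate d 0) : pvStepA d st p = pvStepB d st p := by
  rw [PySem.List.mem_enumerate_iff] at hp
  obtain ⟨k, hk, rfl⟩ := hp
  simp only [pvStepA, pvStepB, zero_add]
  cases hcont : PySem.Set.contains st.1 ((k : Nat) : Int)
  case true => rfl
  rw [if_neg (by simp), if_neg (by simp)]
  obtain ⟨hsize, hslot, hgroup⟩ := pv_best_inv d hnd st.1 k hk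
  rcases hA : (pvBestA d st.1 d[k].1 d[k].2 ((k : Nat) : Int)).2 with _ | σ
  · rw [hslot, hA]
  · rw [hslot, hA]
    simp only
    rw [hsize]
    by_cases hgt : (pvBestA d st.1 d[k].1 d[k].2 ((k : Nat) : Int)).1.length > 1
    · rw [if_pos hgt, if_pos hgt]
      have hg := hgroup σ hA
      have hdk : PySem.List.pyGetD d ((k : Nat) : Int) ("", []) = d[k] := by
        rw [PySem.List.pyGetD_natCast, List.getD_eq_getElem _ _ hk]
      rw [hg]
      simp only [List.map_cons, hdk]
      rw [pv_ofList_cons_map, PySem.Set.update_cons]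
      rfl
    · rw [if_neg hgt, if_neg hgt]

-- ===== VERDICT (by name: the statement is the Claim_ definition above) =====
theorem coalesce_parsed_ignore_rules_py_spec : Claim_equal_coalesce_parsed_ignore_rules_py := by
  intro entries _
  unfold Spec_coalesce_parsed_ignore_rules_py
  have hnd : (PySem.List.dedup entries).Nodup := by
    rw [PySem.List.dedup_eq_ofList]; exact PySem.Set.nodup_ofList entries
  have h := PySem.List.foldl_congr_mem (PySem.List.enumerate (PySem.List.dedup entries) 0)
    (pvStepA (PySem.List.dedup entries)) (pvStepB (PySem.List.dedup entries))
    ((PySem.Set.empty : PySem.Set Int), ([] : List String))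
    (fun st p hp => pv_step_eq _ hnd st p hp)
  unfold coalesce_parsed_ignore_rules_py coalesce_parsed_ignore_rules_py_alt
  rw [pv_dedup_eq]
  exact congrArg Prod.snd h
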